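-- pv_equiv track=rewrite | github.com/entingwu/AlgorithmPython | BitManipulation/MinimumOperationsToReduceAnInteger.py | minOperations1
-- ===== SOURCE A (Python) =====
-- def minOperations1(n: int) -> int:
--     binStr = "{0:b}".format(int(n)) # bin(n)[2:]
--     strs = binStr.split("0")
--     count = 0
--     for i, ch in enumerate(strs):
--         if len(ch) != 0:
--             if ch == "1":
--                 count += 1
--             else:
--                 if i == 0 or (i >= 1 and strs[i - 1] == ''):
--                     count += 2
--                 else:
--                     if i >= 1 and strs[i - 1] == '1':
--                         count += 2
--                     else:
--                         count += 1
--     return count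
-- ===== SOURCE B (Python) =====
-- def minOperations1(n: int) -> int:
--     # Numeric LSB-first scan over runs of ones (no string formatting/splitting).
--     # A lone one costs one; a longer run costs two, except that it costs one when the
--     # next more-significant run is adjacent (single zero gap) and is itself longer
--     # than a lone one -- exactly the rule A applies to its split chunks.
--     m = int(n)
--     count = 0
--     pending = 0            # length of the previous (less significant) run, 0 = none yet
--     while m:
--         gap = 0
--         while m % 2 == 0:
--             gap += 1
--             m //= 2
--         run = 0
--         while m % 2 == 1:
--             run += 1
--             m //= 2
--         if pending:
--             count += 1 if pending == 1 or (pending >= 2 and gap == 1 and run >= 2) else 2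
--         pending = run
--     if pending:
--         count += 1 if pending == 1 else 2
--     return count
-- ===== Notes on version B (the rewrite author's own statement) =====
-- stated objective: alternative
-- what changed: B replaces A's binary-string formatting, split("0") and indexed neighbor lookups by a purely numeric LSB-first scan that strips zero-gaps and one-runs off the integer with %2 and //=2, settling each run's cost against the next run it meets.
-- outside the precondition, e.g. on minOperations1(-5): A returns 3, B does not finish within the time limit
import Mathlib
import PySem

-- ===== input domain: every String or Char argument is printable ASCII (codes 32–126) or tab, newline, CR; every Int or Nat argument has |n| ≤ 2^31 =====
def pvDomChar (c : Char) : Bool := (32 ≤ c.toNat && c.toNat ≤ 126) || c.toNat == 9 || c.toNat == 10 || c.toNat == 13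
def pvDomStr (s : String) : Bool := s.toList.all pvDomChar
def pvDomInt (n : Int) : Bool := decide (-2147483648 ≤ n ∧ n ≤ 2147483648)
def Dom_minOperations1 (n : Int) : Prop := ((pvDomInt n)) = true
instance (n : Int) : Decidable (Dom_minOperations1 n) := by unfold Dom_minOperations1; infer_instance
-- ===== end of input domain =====

-- B re-implements A's run-based count by a purely numeric LSB-first scan (%2, //2) over the
-- integer instead of formatting a binary string and splitting it on "0"; same cost, different
-- algorithmic structure. Return-value equivalence is proved for all n ≥ 0 (Pre_): for n < 0
-- Python B does not terminate while A returns a value accidental to the '-' sign character.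

-- ===== PORT A =====
def minOperations1 (n : Int) : Int :=
  let binStr : List Char := PySem.Int.toBinChars n
  let strs : List (List Char) := PySem.Chars.splitOn binStr ['0']
  (PySem.List.enumerate strs).foldl
    (fun count ic =>
      if ic.2.length ≠ 0 then
        if ic.2 = ['1'] then count + 1
        else if ic.1 = 0 ∨ (1 ≤ ic.1 ∧ PySem.List.pyGetD strs (ic.1 - 1) [] = ([] : List Char)) then count + 2
        else if 1 ≤ ic.1 ∧ PySem.List.pyGetD strs (ic.1 - 1) [] = ['1'] then count + 2
        else count + 1
      else count) 0

-- ===== PORT B =====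
-- termination helper for the halving loops (cited by decreasing_by)
theorem pvFloorHalfLt (m : Int) (h : 0 < m) : (PySem.Int.floordiv m 2).toNat < m.toNat := by
  rw [PySem.Int.floordiv_eq_ediv_of_pos (by norm_num : (0:Int) < 2)]
  omega

-- inner loop `while m % 2 == 0: gap += 1; m //= 2` (the 0 < m conjunct is only a
-- termination guard: Python reaches this loop only with m > 0, where it is vacuous)
def bGap (m : Int) : Nat × Int :=
  if h : 0 < m ∧ PySem.Int.mod m 2 = 0 then
    let p := bGap (PySem.Int.floordiv m 2)
    (p.1 + 1, p.2)
  else (0, m)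
termination_by m.toNat
decreasing_by exact pvFloorHalfLt m h.1

-- inner loop `while m % 2 == 1: run += 1; m //= 2` (same vacuous termination guard)
def bRun (m : Int) : Nat × Int :=
  if h : 0 < m ∧ PySem.Int.mod m 2 = 1 then
    let p := bRun (PySem.Int.floordiv m 2)
    (p.1 + 1, p.2)
  else (0, m)
termination_by m.toNat
decreasing_by exact pvFloorHalfLt m h.1

theorem bGap_snd (m : Int) (h : 0 < m) :
    0 < (bGap m).2 ∧ PySem.Int.mod (bGap m).2 2 = 1 ∧ (bGap m).2 ≤ m := by
  induction m using bGap.induct with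
  | case1 m h1 ih =>
    rw [bGap, dif_pos h1]
    have hp : 0 < PySem.Int.floordiv m 2 := by
      rw [PySem.Int.floordiv_eq_ediv_of_pos (by norm_num : (0:Int) < 2)]
      have := PySem.Int.mod_eq_emod_of_pos (a := m) (b := 2) (by norm_num)
      rw [this] at h1
      omega
    have h2 : PySem.Int.floordiv m 2 ≤ m := by
      rw [PySem.Int.floordiv_eq_ediv_of_pos (by norm_num : (0:Int) < 2)]; omega
    have := ih hp
    exact ⟨this.1, this.2.1, le_trans this.2.2 h2⟩
  | case2 m h1 =>
    rw [bGap, dif_neg h1]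
    have hm : PySem.Int.mod m 2 = 0 ∨ PySem.Int.mod m 2 = 1 := by
      have h1 := PySem.Int.mod_nonneg m (b := 2) (by norm_num)
      have h2 := PySem.Int.mod_lt m (b := 2) (by norm_num)
      omega
    refine ⟨h, ?_, le_refl m⟩
    rcases hm with hm | hm
    · exact absurd ⟨h, hm⟩ h1
    · exact hm

theorem bRun_le (m : Int) (h : 0 ≤ m) : (bRun m).2 ≤ m ∧ 0 ≤ (bRun m).2 := by
  induction m using bRun.induct with
  | case1 m h1 ih =>
    rw [bRun, dif_pos h1]
    have hp : 0 ≤ PySem.Int.floordiv m 2 := by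
      rw [PySem.Int.floordiv_eq_ediv_of_pos (by norm_num : (0:Int) < 2)]; omega
    have h2 : PySem.Int.floordiv m 2 ≤ m := by
      rw [PySem.Int.floordiv_eq_ediv_of_pos (by norm_num : (0:Int) < 2)]; omega
    have := ih hp
    exact ⟨le_trans this.1 h2, this.2⟩
  | case2 m h1 => rw [bRun, dif_neg h1]; exact ⟨le_refl m, h⟩

theorem bRun_lt (m : Int) (h : 0 < m) (h2 : PySem.Int.mod m 2 = 1) : (bRun m).2 < m := by
  rw [bRun, dif_pos ⟨h, h2⟩]
  have hp : 0 ≤ PySem.Int.floordiv m 2 := by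
    rw [PySem.Int.floordiv_eq_ediv_of_pos (by norm_num : (0:Int) < 2)]; omega
  have h3 : PySem.Int.floordiv m 2 < m := by
    rw [PySem.Int.floordiv_eq_ediv_of_pos (by norm_num : (0:Int) < 2)]; omega
  exact lt_of_le_of_lt (bRun_le _ hp).1 h3

-- outer loop `while m:` of Source B (0 < m rather than m ≠ 0 is again a termination guard:
-- for m < 0 Python's loop never terminates)
def bLoop (m : Int) (count : Int) (pending : Nat) : Int :=
  if h : 0 < m then
    let g := bGap m
    let r := bRun g.2
    bLoop r.2
      (if pending ≠ 0 then
        count + (if pending = 1 ∨ (2 ≤ pending ∧ g.1 = 1 ∧ 2 ≤ r.1) then 1 else 2)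
      else count) r.1
  else if pending ≠ 0 then count + (if pending = 1 then 1 else 2) else count
termination_by m.toNat
decreasing_by
  have h1 := bGap_snd m h
  have h2 := bRun_lt (bGap m).2 h1.1 h1.2.1
  omega

def minOperations1_alt (n : Int) : Int := bLoop n 0 0

-- ===== PRECONDITION & SPEC =====
-- Pre_ excludes negative n: there A's value (3 for -5) is an artefact of splitting the
-- '-' sign character together with the digits, and Python B's scan loop never terminates.
def Pre_minOperations1 (n : Int) : Prop := 0 ≤ n
instance (n : Int) : Decidable (Pre_minOperations1 n) := by unfold Pre_minOperations1; infer_instance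
def pvWitness_minOperations1 : Int := (5)

def Spec_minOperations1 (n : Int) (out : Int) : Prop := out = minOperations1_alt n
instance (n : Int) (out : Int) : Decidable (Spec_minOperations1 n out) := by unfold Spec_minOperations1; infer_instance

-- ===== CLAIM (what is proved, stated in full; the proofs are below) =====
def Claim_equal_minOperations1 : Prop := ∀ (n : Int), Dom_minOperations1 n → Pre_minOperations1 n → Spec_minOperations1 n (minOperations1 n)

-- ===== LEMMAS AND PROOFS =====

-- chunk-cost of A's loop body: cost of chunk c whose more-significant neighbour chunk is p
def gA (p : Option (List Char)) (c : List Char) : Int :=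
  if c.length ≠ 0 then
    if c = ['1'] then 1
    else if p = none ∨ p = some [] then 2
    else if p = some ['1'] then 2
    else 1
  else 0

-- A's loop as a left-to-right sum carrying the previous chunk
def PS : Option (List Char) → List (List Char) → Int
  | _, [] => 0
  | p, c :: cs => gA p c + PS (some c) cs

-- the same sum over the LSB-first chunk list: the neighbour is now the NEXT chunk
def SN : List (List Char) → Int
  | [] => 0
  | c :: cs => gA cs.head? c + SN cs

-- LSB-first binary digits of a natural number ([] for 0)
def lsbC (k : Nat) : List Char :=
  if k = 0 then [] else Nat.digitChar (k % 2) :: lsbC (k / 2)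
termination_by k
decreasing_by exact Nat.div_lt_self (by omega) (by omega)

-- does the remaining LSB string start with a single zero followed by a run of ≥ 2 ones?
def startsAdj : List Char → Bool
  | c0 :: c1 :: c2 :: _ => c0 == '0' && c1 == '1' && c2 == '1'
  | _ => false

-- cost of a pending run of length q whose more-significant remainder is s
def gp (q : Nat) (s : List Char) : Int :=
  if q = 0 then 0 else if q = 1 then 1 else if startsAdj s then 1 else 2

-- last element of a list of lists gets [a] appended
def appendLast (a : Char) : List (List Char) → List (List Char)
  | [] => []
  | x :: xs => if xs.isEmpty then [x ++ [a]] else x :: appendLast a xs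

theorem spl_go (fuel : Nat) : ∀ (l cur : List Char) (acc : List (List Char)), l.length < fuel →
    PySem.Chars.splitOn.go ['0'] fuel l cur acc
      = acc.reverse ++ (l.splitOnP (fun c => c == '0')).modifyHead (cur.reverse ++ ·) := by
  induction fuel with
  | zero => intro l cur acc h; omega
  | succ f ih =>
    intro l cur acc h
    cases l with
    | nil => simp [PySem.Chars.splitOn.go]
    | cons c rest =>
      rw [PySem.Chars.splitOn.go]
      by_cases hc : c = '0'
      · subst hc
        have hpre : List.isPrefixOf ['0'] ('0' :: rest) = true := by simp [List.isPrefixOf]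
        rw [if_pos hpre]
        simp only [List.length_cons] at h
        rw [ih _ _ _ (by simpa using Nat.lt_of_succ_lt_succ h)]
        simp [List.splitOnP_cons]
        rcases rest.splitOnP (fun c => c == '0') with _ | ⟨x, xs⟩ <;> rfl
      · have hpre : ¬ List.isPrefixOf ['0'] (c :: rest) = true := by
          simp [List.isPrefixOf]
          exact fun e => hc e.symm
        rw [if_neg hpre]
        simp only [List.length_cons] at h
        rw [ih _ _ _ (Nat.lt_of_succ_lt_succ h)]
        have hne := List.splitOnP_ne_nil (fun c => c == '0') rest
        rcases hx : rest.splitOnP (fun c => c == '0') with _ | ⟨x, xs⟩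
        · exact absurd hx hne
        · simp [List.splitOnP_cons, hc, hx]

theorem spl (s : List Char) :
    PySem.Chars.splitOn s ['0'] = s.splitOnP (fun c => c == '0') := by
  rw [PySem.Chars.splitOn, spl_go (s.length+1) s [] [] (by omega)]
  have hne := List.splitOnP_ne_nil (fun c => c == '0') s
  rcases hx : s.splitOnP (fun c => c == '0') with _ | ⟨x, xs⟩
  · exact absurd hx hne
  · simp

theorem toDigitsCore_eq (fuel : Nat) : ∀ (k : Nat) (ds : List Char), k < fuel →
    Nat.toDigitsCore 2 fuel k ds = (if k = 0 then ['0'] else lsbC k).reverse ++ ds := by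
  induction fuel with
  | zero => intro k ds h; omega
  | succ f ih =>
    intro k ds h
    rw [Nat.toDigitsCore]
    by_cases h0 : k / 2 = 0
    · rw [if_pos h0]
      by_cases hk : k = 0
      · subst hk; simp [Nat.digitChar]
      · have h1 : k = 1 := by omega
        subst h1
        rw [if_neg (by omega), lsbC]
        simp [Nat.digitChar]
        rw [lsbC]
        rfl
    · rw [if_neg h0, ih (k/2) _ (by omega)]
      have hk : ¬ k = 0 := by omega
      rw [if_neg hk, if_neg h0]
      conv_rhs => rw [lsbC, if_neg hk]
      simp

theorem toDigits_eq (k : Nat) : Nat.toDigits 2 k = (if k = 0 then ['0'] else lsbC k).reverse := by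
  rw [Nat.toDigits, toDigitsCore_eq (k+1) k [] (by omega)]; simp

-- A's loop body, named (definitionally the lambda in the port)
def stepA (strs : List (List Char)) (count : Int) (ic : Int × List Char) : Int :=
  if ic.2.length ≠ 0 then
    if ic.2 = ['1'] then count + 1
    else if ic.1 = 0 ∨ (1 ≤ ic.1 ∧ PySem.List.pyGetD strs (ic.1 - 1) [] = ([] : List Char)) then count + 2
    else if 1 ≤ ic.1 ∧ PySem.List.pyGetD strs (ic.1 - 1) [] = ['1'] then count + 2
    else count + 1
  else count

theorem foldA (strs : List (List Char)) :
    ∀ (L : List (List Char)) (j : Nat) (acc : Int), List.drop j strs = L →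
    (PySem.List.enumerate L (j:Int)).foldl (stepA strs) acc
      = acc + PS (if j = 0 then none else some (strs.getD (j-1) [])) L := by
  intro L
  induction L with
  | nil => intro j acc hdrop; simp [PySem.List.enumerate_nil, PS]
  | cons c L' ih =>
    intro j acc hdrop
    rw [PySem.List.enumerate_cons, List.foldl_cons]
    have hget : strs.getD j [] = c := by
      have h1 : (strs.drop j).head? = some c := by rw [hdrop]; rfl
      rw [List.head?_drop] at h1
      simp [List.getD_eq_getElem?_getD, h1]
    have hdrop' : List.drop (j+1) strs = L' := by
      have h2 := congrArg (List.drop 1) hdrop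
      rw [List.drop_drop] at h2
      simpa [Nat.add_comm] using h2
    have hcast : ((j:Int) + 1) = (((j+1 : Nat)) : Int) := by push_cast; ring
    rw [hcast, ih (j+1) _ hdrop']
    have hstep : stepA strs acc ((j:Int), c)
        = acc + gA (if j = 0 then none else some (strs.getD (j-1) [])) c := by
      unfold stepA gA
      by_cases hj : j = 0
      · subst hj
        rw [if_pos rfl]
        by_cases hc0 : c.length ≠ 0
        · rw [if_pos hc0, if_pos hc0]
          by_cases hc1 : c = ['1']
          · rw [if_pos hc1, if_pos hc1]
          · rw [if_neg hc1, if_neg hc1,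
              if_pos (Or.inl (by norm_num)), if_pos (Or.inl rfl)]
        · rw [if_neg hc0, if_neg hc0]; ring
      · have hj1 : ¬ ((j:Int) = 0) := by omega
        have hj2 : (1:Int) ≤ (j:Int) := by omega
        have hgd : PySem.List.pyGetD strs ((j:Int) - 1) [] = strs.getD (j-1) [] := by
          have : ((j:Int) - 1) = (((j-1 : Nat)) : Int) := by omega
          rw [this, PySem.List.pyGetD_natCast]
        rw [if_neg hj]
        simp only [hgd, Option.some.injEq, reduceCtorEq, hj1, hj2, false_or, true_and]
        split_ifs <;> ring
    rw [hstep, PS]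
    have hidx : j + 1 - 1 = j := by omega
    rw [if_neg (show ¬ (j + 1 = 0) by omega), hidx, hget]
    ring

theorem PS_append (L : List (List Char)) : ∀ (p : Option (List Char)) (c : List Char),
    PS p (L ++ [c]) = PS p L + gA (match L.getLast? with | none => p | some x => some x) c := by
  induction L with
  | nil => intro p c; simp [PS]
  | cons a Ltl ih =>
    intro p c
    simp only [List.cons_append, PS, ih (some a) c]
    have : (match (a :: Ltl).getLast? with | none => p | some x => some x)
         = (match Ltl.getLast? with | none => some a | some x => some x) := by
      cases Ltl with
      | nil => rfl
      | cons b tl =>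
        rcases h : (b :: tl).getLast? with _ | x
        · exact absurd h (by simp)
        · rw [List.getLast?_cons_cons, h]
    rw [this]; ring

theorem PS_rev (L : List (List Char)) : PS none L.reverse = SN L := by
  induction L with
  | nil => rfl
  | cons c cs ih =>
    rw [List.reverse_cons, PS_append, ih]
    have : (match cs.reverse.getLast? with | none => (none : Option (List Char)) | some x => some x)
         = cs.head? := by
      rw [List.getLast?_reverse]
      cases cs.head? <;> rfl
    rw [this, SN]; ring

theorem gA_rev (p : Option (List Char)) (c : List Char) :
    gA (p.map List.reverse) c.reverse = gA p c := by
  unfold gA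
  have h1 : c.reverse = ['1'] ↔ c = ['1'] := by
    simp [List.reverse_eq_iff]
  have h2 : p.map List.reverse = none ∨ p.map List.reverse = some [] ↔ p = none ∨ p = some [] := by
    cases p with
    | none => simp
    | some x => simp [List.reverse_eq_iff]
  have h3 : p.map List.reverse = some ['1'] ↔ p = some ['1'] := by
    cases p with
    | none => simp
    | some x => simp [List.reverse_eq_iff]
  simp only [h1, h2, h3, List.length_reverse]

theorem SN_mapRev (L : List (List Char)) : SN (L.map List.reverse) = SN L := by
  induction L with
  | nil => rfl
  | cons c cs ih =>
    simp only [List.map_cons, SN, ih]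
    have : (cs.map List.reverse).head? = cs.head?.map List.reverse := by
      cases cs <;> rfl
    rw [this, gA_rev]

theorem spl_append_singleton (a : Char) (ha : ¬ (a == '0') = true) :
    ∀ (l : List Char),
    (l ++ [a]).splitOnP (fun c => c == '0') = appendLast a (l.splitOnP (fun c => c == '0')) := by
  intro l
  induction l with
  | nil => simp [List.splitOnP_cons, ha, appendLast]
  | cons b l' ih =>
    rw [List.cons_append, List.splitOnP_cons, List.splitOnP_cons]
    by_cases hb : (b == '0') = true
    · rw [if_pos hb, if_pos hb, ih]
      have hne := List.splitOnP_ne_nil (fun c => c == '0') l'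
      rcases hx : l'.splitOnP (fun c => c == '0') with _ | ⟨x, xs⟩
      · exact absurd hx hne
      · simp [appendLast]
    · rw [if_neg hb, if_neg hb, ih]
      have hne := List.splitOnP_ne_nil (fun c => c == '0') l'
      rcases hx : l'.splitOnP (fun c => c == '0') with _ | ⟨x, xs⟩
      · exact absurd hx hne
      · cases xs with
        | nil => simp [appendLast]
        | cons y ys => simp [appendLast]

theorem appendLast_append (a : Char) (Z : List (List Char)) (w : List Char) :
    appendLast a (Z ++ [w]) = Z ++ [w ++ [a]] := by
  induction Z with
  | nil => simp [appendLast]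
  | cons z Z' ih =>
    rw [List.cons_append, appendLast]
    have : (Z' ++ [w]).isEmpty = false := by simp
    rw [this]
    simp [ih]

theorem spl_rev (s : List Char) :
    (s.reverse).splitOnP (fun c => c == '0')
      = ((s.splitOnP (fun c => c == '0')).map List.reverse).reverse := by
  induction s with
  | nil => simp
  | cons a t ih =>
    rw [List.reverse_cons, List.splitOnP_cons]
    by_cases hb : (a == '0') = true
    · rw [show t.reverse ++ [a] = t.reverse ++ a :: [] from rfl,
        List.splitOnP_append_cons (fun c => c == '0') t.reverse [] a hb, ih, if_pos hb]
      simp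
    · rw [spl_append_singleton a hb, ih, if_neg hb]
      have hne := List.splitOnP_ne_nil (fun c => c == '0') t
      rcases hx : t.splitOnP (fun c => c == '0') with _ | ⟨x, xs⟩
      · exact absurd hx hne
      · simp [appendLast_append]

theorem SN_replicate (g : Nat) (L : List (List Char)) :
    SN (List.replicate g [] ++ L) = SN L := by
  induction g with
  | zero => simp
  | succ g' ih =>
    rw [List.replicate_succ, List.cons_append, SN, ih]
    simp [gA]

theorem spl_zeros (g : Nat) (s : List Char) :
    (List.replicate g '0' ++ s).splitOnP (fun c => c == '0')
      = List.replicate g [] ++ s.splitOnP (fun c => c == '0') := by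
  induction g with
  | zero => simp
  | succ g' ih => simp [List.replicate_succ, List.splitOnP_cons, ih]

theorem spl_ones (r : Nat) (s : List Char) :
    (List.replicate r '1' ++ s).splitOnP (fun c => c == '0')
      = (s.splitOnP (fun c => c == '0')).modifyHead (List.replicate r '1' ++ ·) := by
  induction r with
  | zero =>
    have hne := List.splitOnP_ne_nil (fun c => c == '0') s
    rcases hx : s.splitOnP (fun c => c == '0') with _ | ⟨x, xs⟩
    · exact absurd hx hne
    · simp [hx]
  | succ r' ih =>
    rw [List.replicate_succ, List.cons_append, List.splitOnP_cons, if_neg (by decide), ih,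
      List.modifyHead_modifyHead]
    rfl

theorem head_spl (s : List Char) :
    (s.splitOnP (fun c => c == '0')).head? = some (s.takeWhile (fun c => !(c == '0'))) := by
  induction s with
  | nil => rfl
  | cons a t ih =>
    rw [List.splitOnP_cons]
    by_cases hb : (a == '0') = true
    · rw [if_pos hb]
      simp [hb]
    · rw [if_neg hb]
      have hne := List.splitOnP_ne_nil (fun c => c == '0') t
      rcases hx : t.splitOnP (fun c => c == '0') with _ | ⟨x, xs⟩
      · exact absurd hx hne
      · rw [hx] at ih
        simp at ih
        simp [hb, ih]

theorem lsbC_mem (k : Nat) : ∀ c ∈ lsbC k, c = '0' ∨ c = '1' := by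
  induction k using Nat.strong_induction_on with
  | _ k ih =>
    intro c hc
    rw [lsbC] at hc
    by_cases hk : k = 0
    · rw [if_pos hk] at hc; simp at hc
    · rw [if_neg hk] at hc
      rcases List.mem_cons.mp hc with h | h
      · have : k % 2 = 0 ∨ k % 2 = 1 := by omega
        rcases this with h2 | h2 <;> rw [h2] at h
        · left; rw [h]; rfl
        · right; rw [h]; rfl
      · exact ih (k/2) (Nat.div_lt_self (by omega) (by omega)) c h

theorem lsbC_even (k : Nat) (h0 : k ≠ 0) (he : k % 2 = 0) : lsbC k = '0' :: lsbC (k / 2) := by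
  rw [lsbC, if_neg h0, he]; rfl

theorem lsbC_odd (k : Nat) (h0 : k ≠ 0) (he : k % 2 = 1) : lsbC k = '1' :: lsbC (k / 2) := by
  rw [lsbC, if_neg h0, he]; rfl

theorem int_half_toNat (m : Int) (h : 0 < m) : (PySem.Int.floordiv m 2).toNat = m.toNat / 2 := by
  rw [PySem.Int.floordiv_eq_ediv_of_pos (by norm_num : (0:Int) < 2)]; omega

theorem int_mod_toNat (m : Int) (h : 0 < m) : (PySem.Int.mod m 2).toNat = m.toNat % 2 := by
  rw [PySem.Int.mod_eq_emod_of_pos (by norm_num : (0:Int) < 2)]; omega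

theorem bGap_spec (m : Int) (h : 0 ≤ m) :
    lsbC m.toNat = List.replicate (bGap m).1 '0' ++ lsbC ((bGap m).2).toNat
      ∧ 0 ≤ (bGap m).2 := by
  induction m using bGap.induct with
  | case1 m h1 ih =>
    rw [bGap, dif_pos h1]
    have hfp : 0 ≤ PySem.Int.floordiv m 2 := by
      rw [PySem.Int.floordiv_eq_ediv_of_pos (by norm_num : (0:Int) < 2)]; omega
    obtain ⟨ih1, ih2⟩ := ih hfp
    refine ⟨?_, ih2⟩
    have he : m.toNat % 2 = 0 := by
      have := int_mod_toNat m h1.1; rw [h1.2] at this; omega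
    rw [lsbC_even m.toNat (by omega) he, int_half_toNat m h1.1] at *
    rw [ih1, List.replicate_succ]
    rfl
  | case2 m h1 =>
    rw [bGap, dif_neg h1]
    exact ⟨by simp, h⟩

theorem bRun_spec (m : Int) (h : 0 ≤ m) :
    lsbC m.toNat = List.replicate (bRun m).1 '1' ++ lsbC ((bRun m).2).toNat
      ∧ 0 ≤ (bRun m).2
      ∧ (PySem.Int.mod m 2 = 1 → 1 ≤ (bRun m).1)
      ∧ PySem.Int.mod ((bRun m).2) 2 = 0 := by
  induction m using bRun.induct with
  | case1 m h1 ih =>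
    rw [bRun, dif_pos h1]
    have hfp : 0 ≤ PySem.Int.floordiv m 2 := by
      rw [PySem.Int.floordiv_eq_ediv_of_pos (by norm_num : (0:Int) < 2)]; omega
    obtain ⟨ih1, ih2, _, ih4⟩ := ih hfp
    refine ⟨?_, ih2, fun _ => by simp, ih4⟩
    have he : m.toNat % 2 = 1 := by
      have := int_mod_toNat m h1.1; rw [h1.2] at this; omega
    rw [lsbC_odd m.toNat (by omega) he, int_half_toNat m h1.1] at *
    rw [ih1, List.replicate_succ]
    rfl
  | case2 m h1 =>
    rw [bRun, dif_neg h1]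
    refine ⟨by simp, h, ?_, ?_⟩
    · intro hm
      by_cases h0 : m = 0
      · rw [h0] at hm
        norm_num [PySem.Int.mod] at hm
      · exact absurd ⟨by omega, hm⟩ h1
    · by_cases h0 : m = 0
      · rw [h0]
        decide
      · have hmod0 := PySem.Int.mod_nonneg m (b := 2) (by norm_num)
        have hmod1 := PySem.Int.mod_lt m (b := 2) (by norm_num)
        have : PySem.Int.mod m 2 = 0 ∨ PySem.Int.mod m 2 = 1 := by omega
        rcases this with hm | hm
        · exact hm
        · exact absurd ⟨by omega, hm⟩ h1

theorem gp_startsAdj (g r : Nat) (t : List Char) (hr : 1 ≤ r) (h0 : t = [] ∨ t.head? = some '0') :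
    startsAdj (List.replicate g '0' ++ List.replicate r '1' ++ t) = (decide (g = 1 ∧ 2 ≤ r)) := by
  have sA_top : ∀ (c : Char) (s : List Char), c ≠ '0' → startsAdj (c :: s) = false := by
    intro c s hc
    cases s with
    | nil => rfl
    | cons b u =>
      cases u with
      | nil => rfl
      | cons d v => simp [startsAdj, hc]
  have sA_snd : ∀ (c : Char) (s : List Char), c ≠ '1' → startsAdj ('0' :: c :: s) = false := by
    intro c s hc
    cases s with
    | nil => rfl
    | cons d v => simp [startsAdj, hc]
  cases g with
  | zero =>
    cases r with
    | zero => omega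
    | succ r' =>
      simp only [List.replicate_zero, List.nil_append, List.replicate_succ, List.cons_append]
      rw [sA_top '1' _ (by decide)]
      simp
  | succ g' =>
    cases g' with
    | zero =>
      simp only [List.replicate_succ, List.replicate_zero, List.nil_append, List.cons_append]
      cases r with
      | zero => omega
      | succ r' =>
        simp only [List.replicate_succ, List.cons_append]
        cases r' with
        | zero =>
          simp only [List.replicate_zero, List.nil_append]
          rcases h0 with h0 | h0
          · subst h0; simp [startsAdj]
          · rcases t with _ | ⟨c, t'⟩
            · simp [startsAdj]
            · simp only [List.head?_cons, Option.some_inj] at h0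
              subst h0
              simp [startsAdj]
        | succ r'' =>
          simp only [List.replicate_succ, List.cons_append]
          simp [startsAdj]
    | succ g'' =>
      simp only [List.replicate_succ, List.cons_append]
      rw [sA_snd '0' _ (by decide)]
      simp

-- SN over the chunks of a decomposed LSB string, one gap+run step at a time
theorem SN_step (g r : Nat) (t : List Char) (hr : 1 ≤ r)
    (ht : ∀ c ∈ t, c = '0' ∨ c = '1') (h0 : t = [] ∨ t.head? = some '0') :
    SN ((List.replicate g '0' ++ List.replicate r '1' ++ t).splitOnP (fun c => c == '0'))
      = gp r t + SN (t.splitOnP (fun c => c == '0')) := by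
  have hrep1 : List.replicate r '1' = ['1'] ↔ r = 1 := by
    constructor
    · intro h
      have := congrArg List.length h
      simpa using this
    · intro h; subst h; rfl
  have hlen : (List.replicate r '1').length ≠ 0 := by simp; omega
  have gA_ones : ∀ (p : Option (List Char)),
      gA p (List.replicate r '1') =
        if r = 1 then 1 else if p = none ∨ p = some [] ∨ p = some ['1'] then 2 else 1 := by
    intro p
    by_cases hr1 : r = 1
    · subst hr1
      simp [gA]
    · rw [gA, if_pos hlen, if_neg (fun h => hr1 (hrep1.mp h)), if_neg hr1]
      rcases p with _ | w
      · simp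
      · by_cases hw : w = []
        · subst hw; simp
        · by_cases hw1 : w = ['1']
          · subst hw1; simp
          · simp [hw, hw1]
  rw [List.append_assoc, spl_zeros, SN_replicate, spl_ones]
  rcases h0 with h0 | h0
  · subst h0
    rw [List.splitOnP_nil]
    simp only [List.modifyHead_cons, List.append_nil]
    rw [SN, SN, List.head?_nil, gA_ones none]
    simp only [SN, gA, gp, startsAdj]
    split_ifs <;> simp_all
  · rcases t with _ | ⟨c, t2⟩
    · simp at h0
    · simp only [List.head?_cons, Option.some_inj] at h0
      subst h0
      rw [List.splitOnP_cons, if_pos (by decide)]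
      simp only [List.modifyHead_cons, List.append_nil]
      rw [SN, SN]
      have hz : gA ((t2.splitOnP (fun c => c == '0')).head?) [] = 0 := by simp [gA]
      rw [hz, head_spl, gA_ones]
      have key : (if r = 1 then (1:Int)
              else if some (t2.takeWhile (fun c => !(c == '0'))) = none
                  ∨ some (t2.takeWhile (fun c => !(c == '0'))) = some []
                  ∨ some (t2.takeWhile (fun c => !(c == '0'))) = some ['1'] then 2 else 1)
          = gp r ('0' :: t2) := by
        by_cases hr1 : r = 1
        · subst hr1
          simp [gp]
        · rw [if_neg hr1, gp, if_neg (show ¬ r = 0 by omega), if_neg hr1]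
          rcases t2 with _ | ⟨c1, t3⟩
          · simp [startsAdj]
          · rcases ht c1 (by simp) with hc1 | hc1
            · subst hc1
              rcases t3 with _ | ⟨c2, t4⟩ <;> simp [startsAdj]
            · subst hc1
              rcases t3 with _ | ⟨c2, t4⟩
              · simp [startsAdj]
              · rcases ht c2 (by simp) with hc2 | hc2
                · subst hc2
                  simp [startsAdj]
                · subst hc2
                  simp [startsAdj]
      rw [key]
      ring

theorem mainB (k : Nat) : ∀ (count : Int) (pending : Nat),
    bLoop (k : Int) count pending
      = count + gp pending (lsbC k) + SN ((lsbC k).splitOnP (fun c => c == '0')) := by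
  induction k using Nat.strong_induction_on with
  | _ k ih =>
    intro count pending
    by_cases hk : k = 0
    · subst hk
      rw [Nat.cast_zero, bLoop, dif_neg (by norm_num)]
      rw [show lsbC 0 = [] from by rw [lsbC, if_pos rfl]]
      rw [List.splitOnP_nil, SN, SN, gp]
      simp only [List.head?_nil, gA, startsAdj]
      split_ifs <;> simp_all
    · have hpos : (0:Int) < (k:Int) := by omega
      rw [bLoop, dif_pos hpos]
      show bLoop (bRun (bGap (k:Int)).2).2
          (if pending ≠ 0 then
            count + (if pending = 1 ∨ (2 ≤ pending ∧ (bGap (k:Int)).1 = 1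
                ∧ 2 ≤ (bRun (bGap (k:Int)).2).1) then 1 else 2)
          else count) (bRun (bGap (k:Int)).2).1
        = count + gp pending (lsbC k) + SN ((lsbC k).splitOnP (fun c => c == '0'))
      have hg := bGap_snd (k:Int) hpos
      have hgs := bGap_spec (k:Int) (by omega)
      have hrs := bRun_spec (bGap (k:Int)).2 (le_of_lt hg.1)
      have hr1 : 1 ≤ (bRun (bGap (k:Int)).2).1 := hrs.2.2.1 hg.2.1
      have hr2n : 0 ≤ (bRun (bGap (k:Int)).2).2 := hrs.2.1
      have hlt : ((bRun (bGap (k:Int)).2).2).toNat < k := by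
        have h1 := bRun_lt (bGap (k:Int)).2 hg.1 hg.2.1
        have h2 := hg.2.2
        omega
      have hcast : (((bRun (bGap (k:Int)).2).2).toNat : Int) = (bRun (bGap (k:Int)).2).2 :=
        Int.toNat_of_nonneg hr2n
      have hIH := ih _ hlt
      rw [← hcast, hIH]
      -- decompose the digit string
      have hdec : lsbC k = List.replicate (bGap (k:Int)).1 '0'
          ++ List.replicate (bRun (bGap (k:Int)).2).1 '1'
          ++ lsbC ((bRun (bGap (k:Int)).2).2).toNat := by
        have h1 := hgs.1
        rw [Int.toNat_natCast] at h1
        rw [h1, hrs.1, List.append_assoc]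
      have ht : ∀ c ∈ lsbC ((bRun (bGap (k:Int)).2).2).toNat, c = '0' ∨ c = '1' :=
        lsbC_mem _
      have h0 : lsbC ((bRun (bGap (k:Int)).2).2).toNat = []
          ∨ (lsbC ((bRun (bGap (k:Int)).2).2).toNat).head? = some '0' := by
        by_cases hz : (bRun (bGap (k:Int)).2).2 = 0
        · left; rw [hz]; rw [show ((0:Int)).toNat = 0 from rfl, lsbC, if_pos rfl]
        · right
          have hpos2 : 0 < (bRun (bGap (k:Int)).2).2 := by omega
          have he : (((bRun (bGap (k:Int)).2).2).toNat) % 2 = 0 := by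
            have := int_mod_toNat _ hpos2
            rw [hrs.2.2.2] at this
            omega
          rw [lsbC_even _ (by omega) he]
          rfl
      rw [hdec,
        SN_step (bGap (k:Int)).1 (bRun (bGap (k:Int)).2).1 _ hr1 ht h0]
      have hadj := gp_startsAdj (bGap (k:Int)).1 (bRun (bGap (k:Int)).2).1 _ hr1 h0
      have hcnt : (if pending ≠ 0 then
            count + (if pending = 1 ∨ (2 ≤ pending ∧ (bGap (k:Int)).1 = 1
                ∧ 2 ≤ (bRun (bGap (k:Int)).2).1) then 1 else 2)
          else count)
          = count + gp pending (List.replicate (bGap (k:Int)).1 '0'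
              ++ List.replicate (bRun (bGap (k:Int)).2).1 '1'
              ++ lsbC ((bRun (bGap (k:Int)).2).2).toNat) := by
        rw [gp]
        by_cases hp0 : pending = 0
        · subst hp0; simp
        · rw [if_neg hp0, if_pos hp0]
          by_cases hp1 : pending = 1
          · subst hp1
            rw [if_pos (Or.inl rfl), if_pos rfl]
          · rw [if_neg hp1, hadj]
            by_cases hc : (bGap (k:Int)).1 = 1 ∧ 2 ≤ (bRun (bGap (k:Int)).2).1
            · rw [if_pos (Or.inr ⟨by omega, hc.1, hc.2⟩),
                if_pos (show (decide ((bGap (k:Int)).1 = 1 ∧ 2 ≤ (bRun (bGap (k:Int)).2).1)) = true by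
                  simpa using hc)]
            · rw [if_neg (by
                  rintro (h | ⟨_, h1, h2⟩)
                  · exact hp1 h
                  · exact hc ⟨h1, h2⟩),
                if_neg (show ¬ (decide ((bGap (k:Int)).1 = 1 ∧ 2 ≤ (bRun (bGap (k:Int)).2).1)) = true by
                  simpa using hc)]
      rw [hcnt]
      ring

theorem mainA (k : Nat) (hk : k ≠ 0) :
    minOperations1 (k : Int) = SN ((lsbC k).splitOnP (fun c => c == '0')) := by
  have hbin : PySem.Int.toBinChars (k:Int) = (lsbC k).reverse := by
    rw [PySem.Int.toBinChars, if_neg (by omega), Int.toNat_natCast, toDigits_eq, if_neg hk]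
  rw [minOperations1]
  simp only [hbin, spl]
  rw [show (fun (count : Int) (ic : Int × List Char) =>
      if ic.2.length ≠ 0 then
        if ic.2 = ['1'] then count + 1
        else if ic.1 = 0 ∨ (1 ≤ ic.1 ∧ PySem.List.pyGetD ((lsbC k).reverse.splitOnP (fun c => c == '0')) (ic.1 - 1) [] = ([] : List Char)) then count + 2
        else if 1 ≤ ic.1 ∧ PySem.List.pyGetD ((lsbC k).reverse.splitOnP (fun c => c == '0')) (ic.1 - 1) [] = ['1'] then count + 2
        else count + 1
      else count) = stepA ((lsbC k).reverse.splitOnP (fun c => c == '0')) from rfl]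
  have hf := foldA ((lsbC k).reverse.splitOnP (fun c => c == '0'))
    ((lsbC k).reverse.splitOnP (fun c => c == '0')) 0 0 rfl
  rw [Nat.cast_zero] at hf
  rw [hf, spl_rev, if_pos rfl, PS_rev, SN_mapRev]
  ring

-- ===== VERDICT (by name: the statement is the Claim_ definition above) =====
theorem minOperations1_spec : Claim_equal_minOperations1 := by
  intro n _ hpre
  unfold Spec_minOperations1
  have hn : n = (n.toNat : Int) := (Int.toNat_of_nonneg hpre).symm
  rw [hn]
  by_cases hk : n.toNat = 0
  · rw [hk]
    have hB : minOperations1_alt ((0:Nat) : Int) = 0 := by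
      rw [minOperations1_alt, bLoop, dif_neg (by norm_num)]
      norm_num
    rw [hB]
    decide
  · rw [mainA n.toNat hk, minOperations1_alt, mainB n.toNat 0 0]
    rw [gp, if_pos rfl]
    ring
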